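-- pv_equiv track=rewrite | github.com/alexh0810/customer-behavior-ETL | src/utils/parse_helpers.py | extract_first_json_array
-- ===== SOURCE A (Python) =====
-- from typing import Optional
--
-- def extract_first_json_array(text: str) -> Optional[str]:
--     """
--     Find and return the substring corresponding to the first top-level JSON array
--     in `text`. Returns None if not found. Respects quoted strings and escapes.
--     """
--     if not text:
--         return None
--
--     start = text.find("[")
--     if start == -1:
--         return None
--
--     i = start
--     depth = 0
--     in_string = False
--     escape = False
--
--     while i < len(text):
--         ch = text[i]
--
--         if in_string:
--             if escape:
--                 escape = False
--             elif ch == "\\":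
--                 escape = True
--             elif ch == '"':
--                 in_string = False
--         else:
--             if ch == '"':
--                 in_string = True
--             elif ch == "[":
--                 depth += 1
--             elif ch == "]":
--                 depth -= 1
--                 if depth == 0:
--                     return text[start : i + 1]
--         i += 1
--
--     return None
-- ===== SOURCE B (Python) =====
-- def _structural_brackets(text, start):
--     """First pass: list of (position, char) for every '[' / ']' in text[start:]
--     that lies outside a JSON string literal (backslash escapes respected)."""
--     out = []
--     i = start
--     n = len(text)
--     while i < n:
--         c = text[i]
--         if c == '"':
--             i += 1
--             while i < n:
--                 if text[i] == "\\":
--                     i += 2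
--                 elif text[i] == '"':
--                     i += 1
--                     break
--                 else:
--                     i += 1
--         else:
--             if c == "[" or c == "]":
--                 out.append((i, c))
--             i += 1
--     return out
--
--
-- def extract_first_json_array(text):
--     start = text.find("[")
--     if start == -1:
--         return None
--     depth = 0
--     for pos, ch in _structural_brackets(text, start):
--         if ch == "[":
--             depth += 1
--         else:
--             depth -= 1
--             if depth == 0:
--                 return text[start:pos + 1]
--     return None
-- ===== Notes on version B (the rewrite author's own statement) =====
-- stated objective: alternative
-- what changed: A's single stateful scan (in_string/escape flags interleaved with depth tracking) is replaced by two staged passes: a first pass materializes the list of positions of structural '['/']' brackets outside string literals, then a second pass folds a depth counter over that token list to find the matching close bracket.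
import Mathlib
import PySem

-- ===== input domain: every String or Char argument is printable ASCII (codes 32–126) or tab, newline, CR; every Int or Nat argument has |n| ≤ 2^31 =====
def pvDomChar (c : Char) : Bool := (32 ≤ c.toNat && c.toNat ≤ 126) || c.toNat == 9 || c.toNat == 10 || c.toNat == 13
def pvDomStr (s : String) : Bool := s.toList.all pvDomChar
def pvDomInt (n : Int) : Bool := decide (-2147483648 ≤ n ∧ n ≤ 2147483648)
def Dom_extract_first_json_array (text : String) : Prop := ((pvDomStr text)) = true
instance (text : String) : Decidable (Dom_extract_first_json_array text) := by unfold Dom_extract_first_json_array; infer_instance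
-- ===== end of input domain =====

-- B replaces A's single stateful scan (in_string/escape flags) by two staged passes:
-- first materialize the positions of the structural brackets outside string literals,
-- then fold a depth counter over that token list (objective: alternative, same cost).

-- ===== PORT A =====
-- text.find('[') fused with the slice text[start:]: the suffix of the char list
-- starting at the first '[' (none = find returned -1).  Shared helper: both Pythons
-- start with the identical `text.find("[")`.
def pvFindBracket : List Char → Option (List Char)
  | [] => none
  | c :: cs => if c = '[' then some (c :: cs) else pvFindBracket cs

-- A's while-loop. `rest` is the suffix of text from index i; `pre` accumulates the
-- chars text[start:i], so the returned slice text[start:i+1] is pre ++ [ch].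
def pvLoopA (rest : List Char) (pre : List Char) (depth : Int)
    (in_string escape : Bool) : Option (List Char) :=
  match rest with
  | [] => none
  | ch :: cs =>
    if in_string then
      if escape then pvLoopA cs (pre ++ [ch]) depth true false
      else if ch = '\\' then pvLoopA cs (pre ++ [ch]) depth true true
      else if ch = '"' then pvLoopA cs (pre ++ [ch]) depth false false
      else pvLoopA cs (pre ++ [ch]) depth true false
    else
      if ch = '"' then pvLoopA cs (pre ++ [ch]) depth true false
      else if ch = '[' then pvLoopA cs (pre ++ [ch]) (depth + 1) false false
      else if ch = ']' then
        if depth - 1 = 0 then some (pre ++ [ch])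
        else pvLoopA cs (pre ++ [ch]) (depth - 1) false false
      else pvLoopA cs (pre ++ [ch]) depth false false

def extract_first_json_array (text : String) : Option String :=
  if text.toList.isEmpty then none
  else
    match pvFindBracket text.toList with
    | none => none
    | some rest => (pvLoopA rest [] 0 false false).map String.ofList

-- ===== PORT B =====
-- B's inner while-loop (the string skipper inside _structural_brackets), on the
-- suffix after the opening quote: returns (chars consumed incl. the closing quote,
-- remaining suffix).
def pvSkipStr : List Char → List Char × List Char
  | [] => ([], [])
  | c :: cs =>
    if c = '\\' then
      match cs with
      | [] => ([c], [])
      | d :: ds =>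
        let p := pvSkipStr ds
        (c :: d :: p.1, p.2)
    else if c = '"' then ([c], cs)
    else
      let p := pvSkipStr cs
      (c :: p.1, p.2)

-- needed (only) for pvTokens' termination, cited in its decreasing_by
theorem skip_quote (ds : List Char) : pvSkipStr ('"' :: ds) = (['"'], ds) := by
  rw [pvSkipStr.eq_def]; simp
theorem skip_bs (d : Char) (ds : List Char) :
    pvSkipStr ('\\' :: d :: ds) = ('\\' :: d :: (pvSkipStr ds).1, (pvSkipStr ds).2) := by
  rw [pvSkipStr.eq_def]; simp
theorem skip_other (d : Char) (ds : List Char) (h1 : ¬ d = '\\') (h2 : ¬ d = '"') :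
    pvSkipStr (d :: ds) = (d :: (pvSkipStr ds).1, (pvSkipStr ds).2) := by
  rw [pvSkipStr.eq_def]; simp [h1, h2]

theorem pvSkipStr_len (cs : List Char) : (pvSkipStr cs).2.length ≤ cs.length := by
  induction cs using pvSkipStr.induct with
  | case1 => simp [pvSkipStr]
  | case2 => simp [pvSkipStr]
  | case3 d ds ih => rw [skip_bs]; simp; omega
  | case4 ds h => rw [skip_quote]; simp
  | case5 d ds h1 h2 ih => rw [skip_other d ds h1 h2]; simp; omega

-- B's first pass (_structural_brackets): the (index, char) list of brackets outside
-- string literals, over the suffix `rest`, with `i` the index of rest's head.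
def pvTokens : List Char → Nat → List (Nat × Char)
  | [], _ => []
  | c :: cs, i =>
    if c = '"' then
      let p := pvSkipStr cs
      pvTokens p.2 (i + 1 + p.1.length)
    else if c = '[' ∨ c = ']' then (i, c) :: pvTokens cs (i + 1)
    else pvTokens cs (i + 1)
termination_by l _ => l.length
decreasing_by
  · have := pvSkipStr_len cs; simp; omega
  all_goals simp

-- B's second pass: the for-loop over the token list maintaining only `depth`;
-- returns the index of the matching close bracket.
def pvScan : List (Nat × Char) → Int → Option Nat
  | [], _ => none
  | (i, c) :: ts, depth =>
    if c = '[' then pvScan ts (depth + 1)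
    else if depth - 1 = 0 then some i
    else pvScan ts (depth - 1)

def extract_first_json_array_alt (text : String) : Option String :=
  match pvFindBracket text.toList with
  | none => none
  | some rest =>
    match pvScan (pvTokens rest 0) 0 with
    | none => none
    | some k => some (String.ofList (rest.take (k + 1)))

-- ===== PRECONDITION & SPEC =====
def Spec_extract_first_json_array (text : String) (out : Option String) : Prop := out = extract_first_json_array_alt text
instance (text : String) (out : Option String) : Decidable (Spec_extract_first_json_array text out) := by unfold Spec_extract_first_json_array; infer_instance

-- ===== CLAIM (what is proved, stated in full; the proofs are below) =====
def Claim_equal_extract_first_json_array : Prop := ∀ (text : String), Dom_extract_first_json_array text → Spec_extract_first_json_array text (extract_first_json_array text)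

-- ===== LEMMAS AND PROOFS =====

theorem pvSkipStr_append (cs : List Char) : (pvSkipStr cs).1 ++ (pvSkipStr cs).2 = cs := by
  induction cs using pvSkipStr.induct with
  | case1 => simp [pvSkipStr]
  | case2 => simp [pvSkipStr]
  | case3 d ds ih => rw [skip_bs]; simpa using ih
  | case4 ds h => rw [skip_quote]; simp
  | case5 d ds h1 h2 ih => rw [skip_other d ds h1 h2]; simpa using ih

-- unfolding equations for pvTokens (its let/termination block the default simp)
theorem tok_nil (i : Nat) : pvTokens [] i = [] := by rw [pvTokens.eq_def]
theorem tok_quote (cs : List Char) (i : Nat) :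
    pvTokens ('"' :: cs) i = pvTokens (pvSkipStr cs).2 (i + 1 + (pvSkipStr cs).1.length) := by
  rw [pvTokens.eq_def]; simp
theorem tok_bracket (c : Char) (cs : List Char) (i : Nat)
    (hq : ¬ c = '"') (hb : c = '[' ∨ c = ']') :
    pvTokens (c :: cs) i = (i, c) :: pvTokens cs (i + 1) := by
  rw [pvTokens.eq_def]; simp [hq, hb]
theorem tok_other (c : Char) (cs : List Char) (i : Nat)
    (hq : ¬ c = '"') (h1 : ¬ c = '[') (h2 : ¬ c = ']') :
    pvTokens (c :: cs) i = pvTokens cs (i + 1) := by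
  rw [pvTokens.eq_def]; simp [hq, h1, h2]

-- index shift: tokens at offset i are the offset-0 tokens shifted by i
theorem tok_shift (n : Nat) (cs : List Char) (i : Nat) (hn : cs.length ≤ n) :
    pvTokens cs i = (pvTokens cs 0).map (fun t => (i + t.1, t.2)) := by
  induction n generalizing cs i with
  | zero =>
      have : cs = [] := List.length_eq_zero_iff.mp (Nat.le_zero.mp hn)
      subst this; simp [tok_nil]
  | succ n ih =>
      match cs with
      | [] => simp [tok_nil]
      | c :: cs =>
        simp only [List.length_cons, Nat.add_le_add_iff_right] at hn
        by_cases hq : c = '"'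
        · subst hq
          rw [tok_quote, tok_quote]
          have hlen : (pvSkipStr cs).2.length ≤ n := le_trans (pvSkipStr_len cs) hn
          rw [ih _ (i + 1 + (pvSkipStr cs).1.length) hlen,
              ih _ ((0:Nat) + 1 + (pvSkipStr cs).1.length) hlen, List.map_map]
          congr 1
          funext t
          simp only [Function.comp_apply, Prod.mk.injEq]
          exact ⟨by omega, trivial⟩
        · by_cases hb : c = '[' ∨ c = ']'
          · rw [tok_bracket c cs i hq hb, tok_bracket c cs 0 hq hb]
            rw [ih _ (i + 1) hn, ih cs 1 hn]
            simp only [List.map_cons, List.map_map]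
            refine congrArg₂ List.cons (by simp) ?_
            apply List.map_congr_left
            intro t _
            simp only [Function.comp_apply, Prod.mk.injEq]
            exact ⟨by omega, trivial⟩
          · rw [not_or] at hb
            rw [tok_other c cs i hq hb.1 hb.2, tok_other c cs 0 hq hb.1 hb.2]
            rw [ih _ (i + 1) hn, ih cs 1 hn, List.map_map]
            congr 1
            funext t
            simp only [Function.comp_apply, Prod.mk.injEq]
            exact ⟨by omega, trivial⟩

theorem scan_shift (ts : List (Nat × Char)) (i : Nat) (depth : Int) :
    pvScan (ts.map (fun t => (i + t.1, t.2))) depth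
      = (pvScan ts depth).map (fun k => i + k) := by
  induction ts generalizing depth with
  | nil => simp [pvScan]
  | cons t ts ih =>
      obtain ⟨j, c⟩ := t
      simp only [List.map_cons, pvScan]
      split_ifs <;> simp [ih]

theorem take_append_len (a b : List Char) (n : Nat) :
    (a ++ b).take (a.length + n) = a ++ b.take n := by
  simp [List.take_append, List.take_of_length_le]

-- A's in-string mode (escape = false) scans exactly what pvSkipStr consumes.
theorem loopA_instr (cs : List Char) (pre : List Char) (depth : Int) :
    pvLoopA cs pre depth true false =
      pvLoopA (pvSkipStr cs).2 (pre ++ (pvSkipStr cs).1) depth false false := by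
  induction cs using pvSkipStr.induct generalizing pre with
  | case1 => simp [pvLoopA, pvSkipStr]
  | case2 => simp [pvLoopA, pvSkipStr]
  | case3 d ds ih =>
      rw [skip_bs]
      rw [show pvLoopA ('\\' :: d :: ds) pre depth true false
            = pvLoopA ds (pre ++ ['\\'] ++ [d]) depth true false by simp [pvLoopA]]
      rw [ih]
      simp
  | case4 ds h =>
      rw [skip_quote]
      simp [pvLoopA]
  | case5 d ds h1 h2 ih =>
      rw [skip_other d ds h1 h2]
      rw [show pvLoopA (d :: ds) pre depth true false
            = pvLoopA ds (pre ++ [d]) depth true false by simp [pvLoopA, h1, h2]]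
      rw [ih]
      simp

-- main correspondence: A's flag loop equals B's scan over the token list
theorem loopAB (n : Nat) (cs : List Char) (pre : List Char) (depth : Int)
    (hn : cs.length ≤ n) :
    pvLoopA cs pre depth false false
      = (pvScan (pvTokens cs 0) depth).map (fun k => pre ++ cs.take (k + 1)) := by
  induction n generalizing cs pre depth with
  | zero =>
      have : cs = [] := List.length_eq_zero_iff.mp (Nat.le_zero.mp hn)
      subst this; simp [pvLoopA, tok_nil, pvScan]
  | succ n ih =>
      match cs with
      | [] => simp [pvLoopA, tok_nil, pvScan]
      | ch :: cs =>
        simp only [List.length_cons, Nat.add_le_add_iff_right] at hn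
        by_cases hq : ch = '"'
        · subst hq
          rcases hp : pvSkipStr cs with ⟨u, v⟩
          have hcs : u ++ v = cs := by
            have h := pvSkipStr_append cs; rw [hp] at h; simpa using h
          have hlen : v.length ≤ n := by
            have h := pvSkipStr_len cs; rw [hp] at h; simp at h; omega
          rw [show pvLoopA ('"' :: cs) pre depth false false
                = pvLoopA cs (pre ++ ['"']) depth true false by simp [pvLoopA]]
          rw [loopA_instr, hp, tok_quote, hp]
          dsimp only
          rw [ih v (pre ++ ['"'] ++ u) depth hlen]
          rw [tok_shift v.length v (0 + 1 + u.length) le_rfl, scan_shift]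
          cases pvScan (pvTokens v 0) depth with
          | none => simp
          | some k =>
              subst hcs
              simp only [Option.map_some]
              have ht : ('"' :: (u ++ v)).take (0 + 1 + u.length + k + 1)
                  = '"' :: (u ++ v.take (k + 1)) := by
                rw [show 0 + 1 + u.length + k + 1 = u.length + (k + 1) + 1 by omega,
                    List.take_succ_cons, take_append_len]
              rw [ht]; simp
        · by_cases ho : ch = '['
          · subst ho
            rw [show pvLoopA ('[' :: cs) pre depth false false
                  = pvLoopA cs (pre ++ ['[']) (depth + 1) false false by simp [pvLoopA]]
            rw [ih _ _ _ hn]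
            rw [tok_bracket '[' cs 0 (by decide) (Or.inl rfl)]
            rw [show pvScan ((0, '[') :: pvTokens cs 1) depth
                  = pvScan (pvTokens cs 1) (depth + 1) by simp [pvScan]]
            rw [tok_shift cs.length cs 1 le_rfl, scan_shift]
            cases pvScan (pvTokens cs 0) (depth + 1) with
            | none => simp
            | some k => simp [show (1:Nat) + k = k + 1 from by omega, List.take_succ_cons]
          · by_cases hcl : ch = ']'
            · subst hcl
              rw [tok_bracket ']' cs 0 (by decide) (Or.inr rfl)]
              rw [show pvScan ((0, ']') :: pvTokens cs 1) depth
                    = if depth - 1 = 0 then some 0 else pvScan (pvTokens cs 1) (depth - 1) by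
                  simp [pvScan]]
              by_cases hd : depth - 1 = 0
              · simp [pvLoopA, hd]
              · rw [show pvLoopA (']' :: cs) pre depth false false
                      = pvLoopA cs (pre ++ [']']) (depth - 1) false false by
                    simp [pvLoopA, hd]]
                rw [ih _ _ _ hn, if_neg hd]
                rw [tok_shift cs.length cs 1 le_rfl, scan_shift]
                cases pvScan (pvTokens cs 0) (depth - 1) with
                | none => simp
                | some k => simp [show (1:Nat) + k = k + 1 from by omega, List.take_succ_cons]
            · rw [show pvLoopA (ch :: cs) pre depth false false
                    = pvLoopA cs (pre ++ [ch]) depth false false by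
                  simp [pvLoopA, hq, ho, hcl]]
              rw [ih _ _ _ hn]
              rw [tok_other ch cs 0 hq ho hcl]
              rw [tok_shift cs.length cs 1 le_rfl, scan_shift]
              cases pvScan (pvTokens cs 0) depth with
              | none => simp
              | some k => simp [show (1:Nat) + k = k + 1 from by omega, List.take_succ_cons]

-- ===== VERDICT (by name: the statement is the Claim_ definition above) =====
theorem extract_first_json_array_spec : Claim_equal_extract_first_json_array := by
  intro text _
  unfold Spec_extract_first_json_array extract_first_json_array extract_first_json_array_alt
  by_cases he : text.toList.isEmpty
  · have : text.toList = [] := by simpa using he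
    simp [this, pvFindBracket]
  · rw [if_neg he]
    cases h : pvFindBracket text.toList with
    | none => rfl
    | some rest =>
        cases hs : pvScan (pvTokens rest 0) 0 with
        | none => simp [loopAB rest.length rest [] 0 le_rfl, hs]
        | some k => simp [loopAB rest.length rest [] 0 le_rfl, hs]
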